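-- pv_equiv track=rewrite | github.com/Urus1201/tgs_salt_project | src/inference.py | verify_rle
-- ===== SOURCE A (Python) =====
-- def verify_rle(rle_string):
--     """
--     Verify that an RLE string meets competition requirements:
--     - Space-delimited pairs of numbers
--     - Numbers are positive integers
--     - Pairs are sorted
--     - No overlapping ranges
--     """
--     if not rle_string:
--         return False
--
--     # Split into pairs
--     numbers = list(map(int, rle_string.split()))
--     if len(numbers) % 2 != 0:
--         return False
--
--     # Check pairs are positive
--     if any(n <= 0 for n in numbers):
--         return False
--
--     # Check pairs are sorted and non-overlapping
--     pairs = list(zip(numbers[::2], numbers[1::2]))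
--     for i in range(len(pairs)-1):
--         curr_start, curr_len = pairs[i]
--         next_start = pairs[i+1][0]
--         if curr_start + curr_len > next_start:
--             return False
--
--     return True
-- ===== SOURCE B (Python) =====
-- def verify_rle(rle_string):
--     if not rle_string:
--         return False
--     numbers = list(map(int, rle_string.split()))
--     if len(numbers) % 2 != 0:
--         return False
--     if min(numbers, default=1) <= 0:
--         return False
--     # boundary view: flatten the runs into the sequence start1, end1, start2,
--     # end2, ...; with positive numbers the RLE is valid exactly when this
--     # boundary sequence is non-decreasing, i.e. already sorted
--     bounds = [numbers[i] + (numbers[i - 1] if i % 2 else 0) for i in range(len(numbers))]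
--     return bounds == sorted(bounds)
-- ===== Notes on version B (the rewrite author's own statement) =====
-- stated objective: alternative
-- what changed: B replaces A's pair list and adjacent-overlap loop by a reduction to sortedness: it flattens the runs into the boundary sequence start1, end1, start2, end2, ... and accepts iff all numbers are positive (via min) and that boundary list equals its sorted copy.
import Mathlib
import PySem

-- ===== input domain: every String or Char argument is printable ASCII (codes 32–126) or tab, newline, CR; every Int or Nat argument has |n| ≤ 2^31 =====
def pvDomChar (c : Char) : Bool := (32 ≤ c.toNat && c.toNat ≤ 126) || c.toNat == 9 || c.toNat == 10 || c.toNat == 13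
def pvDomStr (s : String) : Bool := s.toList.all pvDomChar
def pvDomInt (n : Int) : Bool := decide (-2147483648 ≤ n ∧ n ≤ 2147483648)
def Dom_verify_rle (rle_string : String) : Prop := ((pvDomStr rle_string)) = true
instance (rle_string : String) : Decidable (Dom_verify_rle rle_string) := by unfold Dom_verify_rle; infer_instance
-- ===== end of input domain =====

-- B reduces A's pair-building and adjacent-overlap loop to a sortedness test on the
-- flattened boundary sequence start1, end1, start2, end2, ... (objective: alternative).

-- shared helper: list(map(int, s.split())) — none = some token raises ValueError
def pvParseAll? : List String → Option (List Int)
  | [] => some []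
  | t :: rest =>
    match PySem.Int.ofStr? t, pvParseAll? rest with
    | some n, some ns => some (n :: ns)
    | _, _ => none

-- ===== PORT A =====
def verify_rle (rle_string : String) : Bool :=
  if rle_string == "" then false
  else
    match pvParseAll? (PySem.Str.split₀ rle_string) with
    | none => false  -- ValueError: excluded by Pre_verify_rle
    | some numbers =>
      if numbers.length % 2 != 0 then false
      else if numbers.any (fun n => decide (n ≤ 0)) then false
      else
        let pairs := ((PySem.List.slice? numbers none none 2).getD []).zip
                     ((PySem.List.slice? numbers (some 1) none 2).getD [])
        (PySem.List.pyRange 0 ((pairs.length : Int) - 1) 1).foldl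
          (fun ok i =>
            let curr := PySem.List.pyGetD pairs i (0, 0)
            let next_start := (PySem.List.pyGetD pairs (i + 1) (0, 0)).1
            if curr.1 + curr.2 > next_start then false else ok) true

-- ===== PORT B =====
def verify_rle_alt (rle_string : String) : Bool :=
  if rle_string == "" then false
  else
    match pvParseAll? (PySem.Str.split₀ rle_string) with
    | none => false  -- ValueError: excluded by Pre_verify_rle
    | some numbers =>
      if numbers.length % 2 != 0 then false
      else if (match PySem.List.min? numbers (fun x => x) with
               | none => (1 : Int)
               | some m => m) ≤ (0 : Int) then false
      else
        -- bounds = [numbers[i] + (numbers[i-1] if i % 2 else 0) for i in range(len(numbers))]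
        let bounds := (PySem.List.pyRange 0 (numbers.length : Int) 1).map
          (fun i => PySem.List.pyGetD numbers i 0 +
            (if PySem.Int.mod i 2 != 0 then PySem.List.pyGetD numbers (i - 1) 0 else 0))
        bounds == PySem.List.sorted bounds (fun x => x) false

-- ===== PRECONDITION & SPEC =====
-- Pre_ excludes exactly the inputs on which A raises ValueError: some whitespace-
-- separated token of the string is not a valid Python int literal.
def Pre_verify_rle (rle_string : String) : Prop :=
  ∀ t ∈ PySem.Str.split₀ rle_string, (PySem.Int.ofStr? t).isSome
instance (rle_string : String) : Decidable (Pre_verify_rle rle_string) := by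
  unfold Pre_verify_rle; infer_instance

def pvWitness_verify_rle : String := "1 2 5 3"

def Spec_verify_rle (rle_string : String) (out : Bool) : Prop := out = verify_rle_alt rle_string
instance (rle_string : String) (out : Bool) : Decidable (Spec_verify_rle rle_string out) := by
  unfold Spec_verify_rle; infer_instance

-- ===== CLAIM (what is proved, stated in full; the proofs are below) =====
def Claim_equal_verify_rle : Prop := ∀ (rle_string : String), Dom_verify_rle rle_string → Pre_verify_rle rle_string → Spec_verify_rle rle_string (verify_rle rle_string)

-- ===== LEMMAS AND PROOFS =====

-- numbers[::2] and numbers[1::2] as structural recursions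
def pvEvens {α : Type} : List α → List α
  | [] => []
  | [x] => [x]
  | x :: _ :: t => x :: pvEvens t

def pvOdds {α : Type} : List α → List α
  | [] => []
  | _ :: t => pvEvens t

def pvToPairs : List Int → List (Int × Int)
  | s :: l :: t => (s, l) :: pvToPairs t
  | _ => []

def pvBad : List (Int × Int) → Bool
  | x :: y :: t => (decide (y.1 < x.1 + x.2)) || pvBad (y :: t)
  | _ => false

-- B's boundary list, structurally
def pvBounds : List Int → List Int
  | [] => []
  | [x] => [x]
  | x :: y :: t => x :: (y + x) :: pvBounds t

lemma pvEvensNat {α : Type} : ∀ xs : List α,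
    (List.range ((xs.length + 1) / 2)).filterMap (fun k => xs[2 * k]?) = pvEvens xs := by
  intro xs
  induction xs using pvEvens.induct with
  | case1 => simp [pvEvens]
  | case2 x => simp [pvEvens]
  | case3 x y t ih =>
    have hlen : ((x :: y :: t).length + 1) / 2 = (t.length + 1) / 2 + 1 := by
      simp; omega
    rw [hlen, List.range_succ_eq_map, List.filterMap_cons, List.filterMap_map]
    simp only [Function.comp]
    have : ∀ k : Nat, (x :: y :: t)[2 * Nat.succ k]? = t[2 * k]? := by
      intro k
      have : 2 * Nat.succ k = 2 * k + 1 + 1 := by omega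
      simp [this]
    simp only [this]
    simp [pvEvens, ih]

lemma pvSlice2_none (xs : List Int) :
    PySem.List.slice? xs none none 2 = some (pvEvens xs) := by
  unfold PySem.List.slice? PySem.List.sliceIndices
  norm_num
  have h1 : (if 0 < xs.length then (((xs.length : Int) + 2 - 1) / 2).toNat else 0)
      = (xs.length + 1) / 2 := by
    split <;> omega
  rw [h1]
  simp only [show ∀ k : Nat, (2 * (k : Int)).toNat = 2 * k from fun k => by omega]
  exact pvEvensNat xs

lemma pvSlice2_one (xs : List Int) :
    PySem.List.slice? xs (some 1) none 2 = some (pvOdds xs) := by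
  cases xs with
  | nil => rfl
  | cons a t =>
    unfold PySem.List.slice? PySem.List.sliceIndices
    norm_num
    have h1 : (if 0 < t.length then (((t.length : Int) + 2 - 1) / 2).toNat else 0)
        = (t.length + 1) / 2 := by
      split <;> omega
    rw [h1]
    have h2 : (fun (x : Nat) => (a :: t)[((1 : Int) + 2 * (x : Int)).toNat]?) = fun x => t[2 * x]? := by
      funext k
      have h3 : ((1 : Int) + 2 * (k : Int)).toNat = 2 * k + 1 := by omega
      simp [h3]
    rw [h2, pvEvensNat t]
    rfl

lemma pvEvens_cons {α : Type} (b : α) (t : List α) : pvEvens (b :: t) = b :: pvOdds t := by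
  cases t <;> simp [pvEvens, pvOdds]

lemma pvZipEvensOdds : ∀ ns : List Int, (pvEvens ns).zip (pvOdds ns) = pvToPairs ns := by
  intro ns
  induction ns using pvEvens.induct with
  | case1 => simp [pvEvens, pvOdds, pvToPairs]
  | case2 x => simp [pvEvens, pvOdds, pvToPairs]
  | case3 s l t ih =>
    rw [show pvEvens (s :: l :: t) = s :: pvEvens t from rfl,
        show pvOdds (s :: l :: t) = pvEvens (l :: t) from rfl, pvEvens_cons]
    simp [pvToPairs, ih]

-- the 'for i in range(len(pairs)-1)' loop, with its early-False absorbed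
lemma pvFoldGuard {α : Type} (p : α → Prop) [DecidablePred p] :
    ∀ (l : List α) (b : Bool),
      l.foldl (fun ok x => if p x then false else ok) b = (b && !l.any (fun x => decide (p x))) := by
  intro l
  induction l with
  | nil => simp
  | cons x t ih =>
    intro b
    rw [List.foldl_cons]
    by_cases h : p x
    · rw [if_pos h, ih]; simp [h]
    · rw [if_neg h, ih]; simp [h]

lemma pvAnyAdjNat : ∀ ps : List (Int × Int),
    (List.range (ps.length - 1)).any
      (fun k => decide ((ps.getD k (0, 0)).1 + (ps.getD k (0, 0)).2 > (ps.getD (k + 1) (0, 0)).1))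
      = pvBad ps := by
  intro ps
  induction ps using pvBad.induct with
  | case1 x y t ih =>
    rw [show pvBad (x :: y :: t) = (decide (y.1 < x.1 + x.2) || pvBad (y :: t)) from rfl, ← ih]
    simp [List.range_succ_eq_map, Function.comp_def, Nat.succ_eq_add_one, gt_iff_lt]
    rfl
  | case2 ps h =>
    cases ps with
    | nil => simp [pvBad]
    | cons x t =>
      cases t with
      | nil => simp [pvBad]
      | cons y t' => exact absurd rfl (fun hh => h x y t' hh)

lemma pvAnyAdj : ∀ ps : List (Int × Int),
    ((PySem.List.pyRange 0 ((ps.length : Int) - 1) 1).any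
      (fun i => decide ((PySem.List.pyGetD ps i (0, 0)).1 + (PySem.List.pyGetD ps i (0, 0)).2 >
        (PySem.List.pyGetD ps (i + 1) (0, 0)).1))) = pvBad ps := by
  intro ps
  rw [PySem.List.pyRange_one, List.any_map]
  have hn : (((ps.length : Int) - 1) - 0).toNat = ps.length - 1 := by omega
  rw [hn]
  have hf : ∀ k : Nat,
      ((fun i => decide ((PySem.List.pyGetD ps i (0, 0)).1 + (PySem.List.pyGetD ps i (0, 0)).2 >
        (PySem.List.pyGetD ps (i + 1) (0, 0)).1)) ∘ (fun k : Nat => (0 : Int) + ↑k)) k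
      = decide ((ps.getD k (0, 0)).1 + (ps.getD k (0, 0)).2 > (ps.getD (k + 1) (0, 0)).1) := by
    intro k
    have h2 : ((0 : Int) + ↑k + 1) = (((k + 1 : Nat)) : Int) := by push_cast; ring
    have h1 : ((0 : Int) + ↑k) = ((k : Nat) : Int) := by omega
    simp only [Function.comp_apply]
    rw [h2, h1, PySem.List.pyGetD_natCast, PySem.List.pyGetD_natCast]
  rw [funext hf]
  exact pvAnyAdjNat ps

-- B's comprehension over range(len(numbers)) computes pvBounds
def pvFN (ns : List Int) (k : Nat) : Int :=
  ns.getD k 0 + (if k % 2 = 1 then ns.getD (k - 1) 0 else 0)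

lemma pvMapRange : ∀ ns : List Int, (List.range ns.length).map (pvFN ns) = pvBounds ns := by
  intro ns
  induction ns using pvBounds.induct with
  | case1 => simp [pvBounds]
  | case2 x => simp [pvBounds, pvFN]
  | case3 x y t ih =>
    have hlen : (x :: y :: t).length = t.length + 1 + 1 := by simp
    rw [hlen, List.range_succ_eq_map, List.range_succ_eq_map]
    simp only [List.map_cons, List.map_map]
    have hcongr : (pvFN (x :: y :: t)) ∘ (Nat.succ ∘ Nat.succ) = pvFN t := by
      funext k
      simp only [Function.comp_apply, pvFN, Nat.succ_eq_add_one]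
      have hm : (k + 1 + 1) % 2 = k % 2 := by omega
      rw [hm]
      by_cases hk : k % 2 = 1
      · have hk1 : 1 ≤ k := by omega
        have : k + 1 + 1 - 1 = (k - 1) + 1 + 1 := by omega
        simp [hk, this]
      · simp [hk]
    rw [hcongr, ih]
    simp [pvBounds, pvFN]

lemma pvBoundsMap (ns : List Int) :
    (PySem.List.pyRange 0 (ns.length : Int) 1).map
      (fun i => PySem.List.pyGetD ns i 0 +
        (if PySem.Int.mod i 2 != 0 then PySem.List.pyGetD ns (i - 1) 0 else 0))
      = pvBounds ns := by
  rw [PySem.List.pyRange_one, List.map_map]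
  have hn : ((ns.length : Int) - 0).toNat = ns.length := by omega
  rw [hn, ← pvMapRange ns]
  apply List.map_congr_left
  intro k _
  simp only [Function.comp_apply, pvFN]
  have h0 : ((0 : Int) + ↑k) = ((k : Nat) : Int) := by omega
  rw [h0, PySem.List.pyGetD_natCast]
  have hmod : PySem.Int.mod ((k : Nat) : Int) 2 = ((k % 2 : Nat) : Int) := by
    simp
  by_cases hk : k % 2 = 1
  · have hk1 : 1 ≤ k := by omega
    have h1 : ((k : Nat) : Int) - 1 = (((k - 1 : Nat)) : Int) := by omega
    rw [hmod, h1, PySem.List.pyGetD_natCast]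
    simp [hk]
  · have hk0 : k % 2 = 0 := by omega
    rw [hmod, hk0]
    simp

-- min(numbers, default=1) ≤ 0  ↔  some number ≤ 0
lemma pvMinLe (ns : List Int) :
    ((match PySem.List.min? ns (fun x => x) with
      | none => (1 : Int)
      | some m => m) ≤ (0 : Int)) ↔ ∃ n ∈ ns, n ≤ 0 := by
  cases hm : PySem.List.min? ns (fun x => x) with
  | none =>
    have : ns = [] := (PySem.List.min?_eq_none_iff ns (fun x => x)).mp hm
    subst this
    simp
  | some m =>
    constructor
    · intro h
      exact ⟨m, PySem.List.min?_mem hm, h⟩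
    · rintro ⟨n, hn, hle⟩
      have := PySem.List.min?_isMin hm n hn
      simp only at this ⊢
      omega

-- positive, non-overlapping runs give a non-decreasing boundary list …
lemma pvBounds_pairwise : ∀ ns : List Int, ns.length % 2 = 0 →
    (∀ n ∈ ns, 0 < n) → pvBad (pvToPairs ns) = false → (pvBounds ns).Pairwise (· ≤ ·) := by
  intro ns
  induction ns using pvBounds.induct with
  | case1 => intro _ _ _; simp [pvBounds]
  | case2 x => intro h; simp at h
  | case3 s l t ih =>
    intro hlen hpos hbad
    have hlt : t.length % 2 = 0 := by simp at hlen; omega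
    have hposT : ∀ n ∈ t, 0 < n := fun n hn => hpos n (by simp [hn])
    have hs : 0 < s := hpos s (by simp)
    have hl : 0 < l := hpos l (by simp)
    match t, hlt with
    | [], _ =>
      simp [pvBounds]
      omega
    | s' :: l' :: t', hlt' =>
      have hbad1 : pvBad (pvToPairs (s' :: l' :: t')) = false ∧ ¬ (s' < s + l) := by
        rw [show pvToPairs (s :: l :: s' :: l' :: t') = (s, l) :: (s', l') :: pvToPairs t' from rfl]
          at hbad
        rw [show pvBad ((s, l) :: (s', l') :: pvToPairs t')
            = (decide (s' < s + l) || pvBad ((s', l') :: pvToPairs t')) from rfl] at hbad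
        rw [show pvToPairs (s' :: l' :: t') = (s', l') :: pvToPairs t' from rfl]
        simp only [Bool.or_eq_false_iff, decide_eq_false_iff_not] at hbad
        exact ⟨hbad.2, hbad.1⟩
      have hPT := ih hlt' hposT hbad1.1
      rw [show pvBounds (s :: l :: s' :: l' :: t') = s :: (l + s) :: pvBounds (s' :: l' :: t')
          from rfl]
      -- heads of pvBounds (s' :: l' :: t') start with s'
      rw [show pvBounds (s' :: l' :: t') = s' :: (l' + s') :: pvBounds t' from rfl] at hPT ⊢
      rw [← List.isChain_iff_pairwise] at hPT ⊢
      exact List.isChain_cons_cons.mpr ⟨by omega, List.isChain_cons_cons.mpr ⟨by omega, hPT⟩⟩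

-- … and an overlap forbids any non-decreasing arrangement of the boundaries
lemma pvBad_not_pairwise : ∀ ns : List Int, ns.length % 2 = 0 →
    pvBad (pvToPairs ns) = true → ¬ (pvBounds ns).Pairwise (· ≤ ·) := by
  intro ns
  induction ns using pvBounds.induct with
  | case1 => intro _ hbad; simp [pvToPairs, pvBad] at hbad
  | case2 x => intro h; simp at h
  | case3 s l t ih =>
    intro hlen hbad hPW
    have hlt : t.length % 2 = 0 := by simp at hlen; omega
    match t, hlt with
    | [], _ => simp [pvToPairs, pvBad] at hbad
    | s' :: l' :: t', hlt' =>
      rw [show pvToPairs (s :: l :: s' :: l' :: t') = (s, l) :: (s', l') :: pvToPairs t' from rfl]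
        at hbad
      rw [show pvBad ((s, l) :: (s', l') :: pvToPairs t')
          = (decide (s' < s + l) || pvBad ((s', l') :: pvToPairs t')) from rfl] at hbad
      rw [show pvBounds (s :: l :: s' :: l' :: t') = s :: (l + s) :: pvBounds (s' :: l' :: t')
          from rfl] at hPW
      have hPW2 : (pvBounds (s' :: l' :: t')).Pairwise (· ≤ ·) :=
        (List.pairwise_cons.mp (List.pairwise_cons.mp hPW).2).2
      simp only [Bool.or_eq_true, decide_eq_true_eq] at hbad
      rcases hbad with hb | hb
      · -- l + s ≤ s' from the pairwise head, contradiction with s' < s + l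
        have hmem : s' ∈ (l + s) :: pvBounds (s' :: l' :: t') := by
          rw [show pvBounds (s' :: l' :: t') = s' :: (l' + s') :: pvBounds t' from rfl]
          simp
        have := (List.pairwise_cons.mp (List.pairwise_cons.mp hPW).2).1 s'
          (by rw [show pvBounds (s' :: l' :: t') = s' :: (l' + s') :: pvBounds t' from rfl]; simp)
        omega
      · have hb' : pvBad (pvToPairs (s' :: l' :: t')) = true := by
          rw [show pvToPairs (s' :: l' :: t') = (s', l') :: pvToPairs t' from rfl]
          exact hb
        exact ih hlt' hb' hPW2

-- the two cores agree on an even-length, all-positive parse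
lemma pvSortedIffNotBad (ns : List Int) (hlen : ns.length % 2 = 0)
    (hpos : ∀ n ∈ ns, 0 < n) :
    (pvBounds ns == PySem.List.sorted (pvBounds ns) (fun x => x) false) = !pvBad (pvToPairs ns) := by
  cases hb : pvBad (pvToPairs ns) with
  | false =>
    have hPW := pvBounds_pairwise ns hlen hpos hb
    rw [PySem.List.sorted_eq_self_of_pairwise (pvBounds ns) (fun x => x) (by simpa using hPW)]
    simp
  | true =>
    have hnp := pvBad_not_pairwise ns hlen hb
    simp only [Bool.not_true, beq_eq_false_iff_ne, ne_eq]
    intro heq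
    apply hnp
    have := PySem.List.sorted_pairwise (pvBounds ns) (fun x => x)
    rw [← heq] at this
    simpa using this

-- ===== VERDICT (by name: the statement is the Claim_ definition above) =====
theorem verify_rle_spec : Claim_equal_verify_rle := by
  unfold Claim_equal_verify_rle
  intro s _ _
  unfold Spec_verify_rle verify_rle verify_rle_alt
  cases hE : (s == "") with
  | true => simp
  | false =>
    simp only [Bool.false_eq_true, if_false]
    cases hP : pvParseAll? (PySem.Str.split₀ s) with
    | none => rfl
    | some numbers =>
      cases hc : (numbers.length % 2 != 0) with
      | true => simp [hc]
      | false =>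
        have hpar : numbers.length % 2 = 0 := by simpa using hc
        simp only [hc, Bool.false_eq_true, if_false]
        by_cases hneg : ∃ n ∈ numbers, n ≤ 0
        · have hA : numbers.any (fun n => decide (n ≤ 0)) = true := by
            simpa using hneg
          have hB : ((match PySem.List.min? numbers (fun x => x) with
              | none => (1 : Int) | some m => m) ≤ (0 : Int)) := (pvMinLe numbers).mpr hneg
          rw [hA, if_pos hB]
          simp
        · have hA : numbers.any (fun n => decide (n ≤ 0)) = false := by
            simp only [List.any_eq_false, decide_eq_true_eq]
            intro n hn hle
            exact hneg ⟨n, hn, hle⟩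
          have hpos : ∀ n ∈ numbers, 0 < n := by
            intro n hn
            by_contra h
            exact hneg ⟨n, hn, by omega⟩
          have hB : ¬ ((match PySem.List.min? numbers (fun x => x) with
              | none => (1 : Int) | some m => m) ≤ (0 : Int)) := fun h => hneg ((pvMinLe numbers).mp h)
          rw [hA, if_neg hB]
          simp only [Bool.false_eq_true, if_false]
          rw [pvSlice2_none, pvSlice2_one]
          simp only [Option.getD_some, pvZipEvensOdds]
          rw [pvFoldGuard (p := fun i =>
            (PySem.List.pyGetD (pvToPairs numbers) i (0, 0)).1 +
              (PySem.List.pyGetD (pvToPairs numbers) i (0, 0)).2 >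
            (PySem.List.pyGetD (pvToPairs numbers) (i + 1) (0, 0)).1)]
          rw [Bool.true_and, pvAnyAdj, pvBoundsMap numbers,
            pvSortedIffNotBad numbers hpar hpos]
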